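-- pv_equiv track=rewrite | github.com/miliar/Code_Jam_Webscraper | solutions_python/Problem_155/1583.py | minF
-- ===== SOURCE A (Python) =====
-- def minF(n,shy):
--     ans = 0
--     cuml = 0
--     for i in range(n+1):
--         if i<=cuml:
--             cuml += int(shy[i])
--         else:
--             xtra = i-cuml
--             cuml+=xtra+int(shy[i])
--             ans+=xtra
--     return(ans)
-- ===== SOURCE B (Python) =====
-- def minF(n, shy):
--     vals = [int(shy[i]) for i in range(n + 1)]
--     prefixes = [0]
--     t = 0
--     for v in vals:
--         t += v
--         prefixes.append(t)
--     return max((i - p for i, p in enumerate(prefixes[:len(vals)])), default=0)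
-- ===== Notes on version B (the rewrite author's own statement) =====
-- stated objective: alternative
-- what changed: Replaces A's greedy corrective loop (which folds invited friends back into the running count cuml and branches on i<=cuml) with a branch-free formulation: build the prefix sums of the shyness values and return the maximum prefix deficit max(i - P_i, default 0).
import Mathlib
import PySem

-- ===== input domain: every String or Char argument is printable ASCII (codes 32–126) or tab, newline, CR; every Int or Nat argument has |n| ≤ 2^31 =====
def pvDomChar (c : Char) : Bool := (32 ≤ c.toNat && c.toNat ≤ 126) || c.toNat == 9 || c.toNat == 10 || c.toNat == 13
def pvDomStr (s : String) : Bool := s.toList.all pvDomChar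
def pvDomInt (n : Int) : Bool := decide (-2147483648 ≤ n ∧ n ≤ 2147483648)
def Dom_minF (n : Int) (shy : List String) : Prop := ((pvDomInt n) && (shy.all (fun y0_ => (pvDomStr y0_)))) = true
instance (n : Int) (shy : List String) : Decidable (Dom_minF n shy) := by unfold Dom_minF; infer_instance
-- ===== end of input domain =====

-- B rewrites A's greedy corrective loop as the maximum prefix deficit max(i - P_i); same cost, branch-free (objective: alternative).

-- int(shy[i]) : both Pythons read and parse the same positions; inputs where this raises are outside Pre_minF
def pvGetI (shy : List String) (i : Int) : Int :=
  ((PySem.List.pyGet? shy i).bind PySem.Int.ofStr?).getD 0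

-- ===== PORT A =====
def minF (n : Int) (shy : List String) : Int :=
  ((PySem.List.pyRange 0 (n + 1) 1).foldl
    (fun (st : Int × Int) i =>
      if i ≤ st.2 then (st.1, st.2 + pvGetI shy i)
      else (st.1 + (i - st.2), st.2 + (i - st.2) + pvGetI shy i))
    (0, 0)).1

-- ===== PORT B =====
def minF_alt (n : Int) (shy : List String) : Int :=
  let vals := (PySem.List.pyRange 0 (n + 1) 1).map (pvGetI shy)
  let pt := vals.foldl (fun (st : List Int × Int) v => (st.1 ++ [st.2 + v], st.2 + v)) ([0], 0)
  let deficits := (PySem.List.enumerate (pt.1.take vals.length)).map (fun q => q.1 - q.2)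
  (PySem.List.max? deficits (fun x => x)).getD 0

-- ===== PRECONDITION & SPEC =====
-- Pre_ excludes exactly the inputs where A raises: an index 0..n out of range (IndexError) or a
-- string among the first n+1 that int() rejects (ValueError).
def Pre_minF (n : Int) (shy : List String) : Prop :=
  n < 0 ∨ (n + 1 ≤ (shy.length : Int) ∧
    ∀ s ∈ shy.take (n + 1).toNat, (PySem.Int.ofStr? s).isSome = true)
instance (n : Int) (shy : List String) : Decidable (Pre_minF n shy) := by
  unfold Pre_minF; infer_instance
def pvWitness_minF : Int × List String := (2, ["1", "0", "2"])
def Spec_minF (n : Int) (shy : List String) (out : Int) : Prop := out = minF_alt n shy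
instance (n : Int) (shy : List String) (out : Int) : Decidable (Spec_minF n shy out) := by unfold Spec_minF; infer_instance

-- ===== CLAIM (what is proved, stated in full; the proofs are below) =====
def Claim_equal_minF : Prop := ∀ (n : Int) (shy : List String), Dom_minF n shy → Pre_minF n shy → Spec_minF n shy (minF n shy)

-- ===== LEMMAS AND PROOFS =====

-- prefix sums of f 0, f 1, …
def pvPref (f : Int → Int) : Nat → Int
  | 0 => 0
  | k + 1 => pvPref f k + f k

-- running maximum of the prefix deficits, with initial 0
def pvBigM (f : Int → Int) : Nat → Int
  | 0 => 0
  | k + 1 => max (pvBigM f k) ((k : Int) - pvPref f k)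

theorem pvLoopA (f : Int → Int) (k : Nat) :
    ((List.range k).map (fun j : Nat => (j : Int))).foldl
      (fun (st : Int × Int) i =>
        if i ≤ st.2 then (st.1, st.2 + f i)
        else (st.1 + (i - st.2), st.2 + (i - st.2) + f i))
      (0, 0) = (pvBigM f k, pvPref f k + pvBigM f k) := by
  induction k with
  | zero => simp [pvBigM, pvPref]
  | succ k ih =>
    rw [List.range_succ, List.map_append, List.foldl_append, ih]
    simp only [List.map_cons, List.map_nil, List.foldl_cons, List.foldl_nil,
      pvBigM, pvPref]
    by_cases h : (k : Int) ≤ pvPref f k + pvBigM f k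
    · rw [if_pos h]
      simp only [Prod.mk.injEq]
      constructor <;> omega
    · rw [if_neg h]
      simp only [Prod.mk.injEq]
      constructor <;> omega

theorem pvPrefixes (f : Int → Int) (k : Nat) :
    ((List.range k).map (fun j : Nat => f (j : Int))).foldl
      (fun (st : List Int × Int) v => (st.1 ++ [st.2 + v], st.2 + v)) ([0], 0)
      = ((List.range (k + 1)).map (fun j : Nat => pvPref f j), pvPref f k) := by
  induction k with
  | zero => simp [pvPref]
  | succ k ih =>
    rw [List.range_succ, List.map_append, List.foldl_append, ih]
    simp [List.range_succ, pvPref]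

theorem pvDeficits (g : Nat → Int) (m : Nat) (s : Int) :
    (PySem.List.enumerate ((List.range m).map g) s).map (fun q => q.1 - q.2)
      = (List.range m).map (fun k : Nat => s + (k : Int) - g k) := by
  induction m with
  | zero => simp
  | succ m ih =>
    rw [List.range_succ, List.map_append, PySem.List.enumerate_append,
      List.map_append, ih]
    simp [PySem.List.enumerate]

theorem pvBigM_foldl (f : Int → Int) (m : Nat) :
    pvBigM f m = ((List.range m).map (fun k : Nat => (k : Int) - pvPref f k)).foldl max 0 := by
  induction m with
  | zero => simp [pvBigM]
  | succ m ih =>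
    rw [List.range_succ, List.map_append, List.foldl_append, ← ih]
    simp [pvBigM]

theorem pvMax (f : Int → Int) (m : Nat) :
    (PySem.List.max? ((List.range m).map (fun k : Nat => (k : Int) - pvPref f k))
        (fun x => x)).getD 0 = pvBigM f m := by
  cases m with
  | zero => simp [pvBigM, PySem.List.max?]
  | succ k =>
    rw [List.range_succ_eq_map]
    simp only [List.map_cons, Nat.cast_zero, pvPref, List.map_map]
    have h0 : (0 : Int) - 0 = 0 := by omega
    rw [h0, PySem.List.max?_id_cons, Option.getD_some]
    rw [pvBigM_foldl, List.range_succ_eq_map]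
    simp only [List.map_cons, Nat.cast_zero, List.map_map, List.foldl_cons]
    have h1 : pvPref f 0 = 0 := rfl
    rw [h1, h0]
    have h2 : max (0:Int) 0 = 0 := by omega
    rw [h2]

-- ===== VERDICT (by name: the statement is the Claim_ definition above) =====
theorem minF_spec : Claim_equal_minF := by
  unfold Claim_equal_minF
  intro n shy _ _
  unfold Spec_minF minF minF_alt
  rw [PySem.List.pyRange_one]
  simp only [sub_zero, zero_add, List.map_map, Function.comp_def]
  rw [pvLoopA (pvGetI shy) ((n + 1).toNat)]
  rw [pvPrefixes (pvGetI shy) ((n + 1).toNat)]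
  simp only [List.length_map, List.length_range, ← List.map_take,
    List.take_range]
  have hmin : min ((n + 1).toNat) ((n + 1).toNat + 1) = (n + 1).toNat := by omega
  rw [hmin]
  rw [pvDeficits (fun j : Nat => pvPref (pvGetI shy) j) ((n + 1).toNat) 0]
  simp only [zero_add]
  rw [pvMax]
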